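-- pv_equiv track=rewrite | github.com/mar-l01/AdventOfCode_2020 | day_16/puzzles.py | get_invalid_ticket_values
-- ===== SOURCE A (Python) =====
-- def get_invalid_ticket_values(ticket_rules, nearby_ticket):
--     """
--     Use given 'nearby_ticket' and check if each value int this list matches at least one rule of given
--     'ticket_rules'. If a value does not match the given rule, add them to a list. In the end return
--     this list.
--     """
--     invalid_values = []
--
--     # go through each value of given ticket
--     for value in nearby_ticket:
--         # check if value matches at least 1 rule (which one does not matter!)
--         value_does_not_match_rule = True
--         for intervalls in ticket_rules.values():
--             if value_matches_rule(intervalls, value):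
--                 value_does_not_match_rule = False
--
--         # value did not match to any rule --> add it to non-matching values list
--         if value_does_not_match_rule:
--             invalid_values.append(value)
--
--     return invalid_values
--
-- def value_matches_rule(intervalls, value):
--     """ Check if given 'value' is in intervall given as list of two intervalls in 'ticket_rule' """
--     interval_1, interval_2 = intervalls
--     if interval_1[0] <= value <= interval_1[1] or\
--         interval_2[0] <= value <= interval_2[1]:
--         return True
--
--     return False
-- ===== SOURCE B (Python) =====
-- def get_invalid_ticket_values(ticket_rules, nearby_ticket):
--     # Collect every rule interval once, sort by lower bound, merge overlapping
--     # intervals, then binary-search each ticket value in the merged list.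
--     intervals = []
--     for intervalls in ticket_rules.values():
--         for iv in intervalls:
--             intervals.append((iv[0], iv[1]))
--     intervals = sorted(intervals, key=lambda t: t[0])
--
--     merged = []
--     for lo, hi in intervals:
--         if merged and lo <= merged[-1][1]:
--             if hi > merged[-1][1]:
--                 merged[-1] = (merged[-1][0], hi)
--         else:
--             merged.append((lo, hi))
--
--     invalid_values = []
--     n = len(merged)
--     for value in nearby_ticket:
--         i = _upper(merged, value, 0, n)  # number of merged intervals starting <= value
--         if i == 0 or merged[i - 1][1] < value:
--             invalid_values.append(value)
--     return invalid_values
--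
--
-- def _upper(merged, value, lo, hi):
--     """Rightmost insertion point: first index in [lo, hi) whose start exceeds value."""
--     if lo >= hi:
--         return lo
--     mid = (lo + hi) // 2
--     if merged[mid][0] <= value:
--         return _upper(merged, value, mid + 1, hi)
--     return _upper(merged, value, lo, mid)
-- ===== Notes on version B (the rewrite author's own statement) =====
-- stated objective: faster
-- what changed: Instead of scanning every rule's two intervals for every ticket value, B collects all intervals once, sorts and merges them into disjoint intervals, and binary-searches each ticket value in the merged list.
-- outside the precondition, e.g. on get_invalid_ticket_values({'a': [[5], [2, 3]]}, [1]): A returns [1], B raises IndexError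
import Mathlib
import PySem

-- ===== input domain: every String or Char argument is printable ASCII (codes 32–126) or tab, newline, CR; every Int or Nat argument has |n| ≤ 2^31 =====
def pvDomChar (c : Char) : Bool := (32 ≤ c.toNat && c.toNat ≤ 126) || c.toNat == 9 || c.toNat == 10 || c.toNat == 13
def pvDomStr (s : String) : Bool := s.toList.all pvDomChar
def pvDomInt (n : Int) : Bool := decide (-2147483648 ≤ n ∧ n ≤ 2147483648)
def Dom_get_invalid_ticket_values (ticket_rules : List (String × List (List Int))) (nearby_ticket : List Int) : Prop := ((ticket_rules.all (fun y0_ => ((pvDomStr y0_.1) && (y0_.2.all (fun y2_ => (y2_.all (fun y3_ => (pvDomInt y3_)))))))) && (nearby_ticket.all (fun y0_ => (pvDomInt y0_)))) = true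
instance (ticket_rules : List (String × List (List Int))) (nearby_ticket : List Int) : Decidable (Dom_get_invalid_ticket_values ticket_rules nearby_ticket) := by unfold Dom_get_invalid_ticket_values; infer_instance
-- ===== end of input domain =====

-- B replaces the per-value scan of every rule by one sorted+merged interval list and a
-- hand-written binary search per ticket value (objective: faster).

-- ===== PORT A =====
-- value_matches_rule(intervalls, value); indexing is total via pyGetD only because
-- Pre_ guarantees the indices exist (Python raises outside Pre_).
def value_matches_rule (intervalls : List (List Int)) (value : Int) : Bool :=
  let interval_1 := PySem.List.pyGetD intervalls 0 []
  let interval_2 := PySem.List.pyGetD intervalls 1 []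
  if (PySem.List.pyGetD interval_1 0 0 ≤ value ∧ value ≤ PySem.List.pyGetD interval_1 1 0)
      ∨ (PySem.List.pyGetD interval_2 0 0 ≤ value ∧ value ≤ PySem.List.pyGetD interval_2 1 0) then
    true
  else
    false

def get_invalid_ticket_values (ticket_rules : List (String × List (List Int))) (nearby_ticket : List Int) : List Int :=
  nearby_ticket.foldl (fun invalid_values value =>
    let value_does_not_match_rule :=
      ((PySem.Dict.ofList ticket_rules).values).foldl
        (fun b intervalls => if value_matches_rule intervalls value then false else b) true
    if value_does_not_match_rule then invalid_values ++ [value] else invalid_values) []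

-- ===== PORT B =====
-- one merge step of Source B's 'for lo, hi in intervals' loop (merged[-1] access/update)
def pvMergeStep (merged : List (Int × Int)) (p : Int × Int) : List (Int × Int) :=
  if merged ≠ [] ∧ p.1 ≤ (merged.getLastD (0, 0)).2 then
    if (merged.getLastD (0, 0)).2 < p.2 then
      merged.dropLast ++ [((merged.getLastD (0, 0)).1, p.2)]
    else merged
  else merged ++ [p]

-- _upper(merged, value, lo, hi); lo/hi are the nonnegative Python ints 0..len(merged),
-- kept as Nat (Python's (lo+hi)//2 on nonnegative ints is Nat division; merged[mid] with
-- 0 ≤ mid < len is getD).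
def pvUpper (merged : List (Int × Int)) (value : Int) (lo hi : Nat) : Nat :=
  if h : lo ≥ hi then lo
  else
    let mid := (lo + hi) / 2
    if (merged.getD mid (0, 0)).1 ≤ value then pvUpper merged value (mid + 1) hi
    else pvUpper merged value lo mid
termination_by hi - lo
decreasing_by
  · have h1 : lo ≤ (lo + hi) / 2 := Nat.le_div_iff_mul_le (by norm_num) |>.2 (by omega)
    omega
  · have h2 : (lo + hi) / 2 < hi := Nat.div_lt_iff_lt_mul (by norm_num) |>.2 (by omega)
    omega

def get_invalid_ticket_values_alt (ticket_rules : List (String × List (List Int))) (nearby_ticket : List Int) : List Int :=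
  let intervals :=
    ((PySem.Dict.ofList ticket_rules).values).foldl
      (fun acc intervalls =>
        intervalls.foldl (fun acc iv => acc ++ [(PySem.List.pyGetD iv 0 0, PySem.List.pyGetD iv 1 0)]) acc) []
  let intervals := PySem.List.sorted intervals (fun t => t.1) false
  let merged := intervals.foldl pvMergeStep []
  let n := merged.length
  nearby_ticket.foldl (fun invalid_values value =>
    let i := pvUpper merged value 0 n
    if i = 0 ∨ (merged.getD (i - 1) (0, 0)).2 < value then invalid_values ++ [value]
    else invalid_values) []

-- ===== PRECONDITION & SPEC =====
-- Pre_: every interval of every rule is indexable at 0 and 1, and (unless the ticket is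
-- empty, in which case A never unpacks a rule) every rule value is exactly the two intervals
-- the Python unpacking needs; outside it A raises (ValueError/IndexError) except on inputs
-- where boolean short-circuiting skips the missing index, where A happens to return while
-- B still raises while collecting the intervals.
def Pre_get_invalid_ticket_values (ticket_rules : List (String × List (List Int))) (nearby_ticket : List Int) : Prop :=
  (∀ ivls ∈ (PySem.Dict.ofList ticket_rules).values, ∀ iv ∈ ivls, 2 ≤ iv.length) ∧
  (nearby_ticket = [] ∨ ∀ ivls ∈ (PySem.Dict.ofList ticket_rules).values, ivls.length = 2)
instance (ticket_rules : List (String × List (List Int))) (nearby_ticket : List Int) : Decidable (Pre_get_invalid_ticket_values ticket_rules nearby_ticket) := by unfold Pre_get_invalid_ticket_values; infer_instance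

def pvWitness_get_invalid_ticket_values : (List (String × List (List Int))) × List Int :=
  ([("row", [[1, 3], [5, 7]]), ("seat", [[10, 11], [0, 0]])], [2, 4, 10, 8, 0])

def Spec_get_invalid_ticket_values (ticket_rules : List (String × List (List Int))) (nearby_ticket : List Int) (out : List Int) : Prop := out = get_invalid_ticket_values_alt ticket_rules nearby_ticket
instance (ticket_rules : List (String × List (List Int))) (nearby_ticket : List Int) (out : List Int) : Decidable (Spec_get_invalid_ticket_values ticket_rules nearby_ticket out) := by unfold Spec_get_invalid_ticket_values; infer_instance

-- ===== CLAIM (what is proved, stated in full; the proofs are below) =====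
def Claim_equal_get_invalid_ticket_values : Prop := ∀ (ticket_rules : List (String × List (List Int))) (nearby_ticket : List Int), Dom_get_invalid_ticket_values ticket_rules nearby_ticket → Pre_get_invalid_ticket_values ticket_rules nearby_ticket → Spec_get_invalid_ticket_values ticket_rules nearby_ticket (get_invalid_ticket_values ticket_rules nearby_ticket)

-- ===== LEMMAS AND PROOFS =====

-- 'some interval pair in l covers v'
def pvCov (l : List (Int × Int)) (v : Int) : Prop := ∃ p ∈ l, p.1 ≤ v ∧ v ≤ p.2

theorem pvCov_nil (v : Int) : pvCov [] v ↔ False := by simp [pvCov]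

theorem pvCov_cons (x : Int × Int) (l : List (Int × Int)) (v : Int) :
    pvCov (x :: l) v ↔ (x.1 ≤ v ∧ v ≤ x.2) ∨ pvCov l v := by
  constructor
  · rintro ⟨p, hm, hpc⟩
    rcases List.mem_cons.1 hm with h | h
    · subst h; exact Or.inl hpc
    · exact Or.inr ⟨p, h, hpc⟩
  · rintro (h | ⟨p, hm, hpc⟩)
    · exact ⟨x, List.mem_cons_self .., h⟩
    · exact ⟨p, List.mem_cons_of_mem _ hm, hpc⟩

theorem pvCov_append (l1 l2 : List (Int × Int)) (v : Int) :
    pvCov (l1 ++ l2) v ↔ pvCov l1 v ∨ pvCov l2 v := by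
  constructor
  · rintro ⟨p, hm, hpc⟩
    rcases List.mem_append.1 hm with h | h
    · exact Or.inl ⟨p, h, hpc⟩
    · exact Or.inr ⟨p, h, hpc⟩
  · rintro (⟨p, hm, hpc⟩ | ⟨p, hm, hpc⟩)
    · exact ⟨p, List.mem_append_left _ hm, hpc⟩
    · exact ⟨p, List.mem_append_right _ hm, hpc⟩

theorem pvCov_singleton (x : Int × Int) (v : Int) :
    pvCov [x] v ↔ x.1 ≤ v ∧ v ≤ x.2 := by
  rw [show [x] = x :: ([] : List (Int × Int)) from rfl, pvCov_cons, pvCov_nil]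
  tauto


theorem pvMerge_spec : ∀ (l acc : List (Int × Int)),
  l.Pairwise (fun p q => p.1 ≤ q.1) →
  acc.Pairwise (fun p q => p.1 ≤ q.1) →
  acc.IsChain (fun p q => p.2 < q.1) →
  (∀ p ∈ l, ∀ q ∈ acc, q.1 ≤ p.1) →
  ((l.foldl pvMergeStep acc).Pairwise (fun p q => p.1 ≤ q.1) ∧
   (l.foldl pvMergeStep acc).IsChain (fun p q => p.2 < q.1)) ∧
  (∀ v, pvCov (l.foldl pvMergeStep acc) v ↔ pvCov acc v ∨ pvCov l v) := by
  intro l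
  induction l with
  | nil => intro acc _ hp hc _; exact ⟨⟨hp, hc⟩, fun v => by simp [pvCov]⟩
  | cons x rest ih =>
    intro acc hl hp hc hle
    have hxrest : ∀ p ∈ rest, x.1 ≤ p.1 := fun p hp' => (List.pairwise_cons.1 hl).1 p hp'
    have hlrest : rest.Pairwise (fun p q => p.1 ≤ q.1) := (List.pairwise_cons.1 hl).2
    rcases List.eq_nil_or_concat' acc with hnil | ⟨front, q, hacc⟩
    · subst hnil
      have hstep : pvMergeStep [] x = [x] := by simp [pvMergeStep]
      rw [List.foldl_cons, hstep]
      obtain ⟨hgood, hcov⟩ := ih [x] hlrest (List.pairwise_singleton _ _) (.singleton _)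
        (by intro p hp' q hq; simp at hq; subst hq; exact hxrest p hp')
      refine ⟨hgood, fun v => ?_⟩
      rw [hcov v]
      rw [pvCov_singleton, pvCov_nil, pvCov_cons]
      tauto
    · subst hacc
      have hqlast : (front ++ [q]).getLastD (0,0) = q := by simp
      have hql : ∀ p ∈ x :: rest, q.1 ≤ p.1 := fun p hp' => hle p hp' q (by simp)
      have hfq : ∀ a ∈ front, a.1 ≤ q.1 := fun a ha =>
        (List.pairwise_append.1 hp).2.2 a ha q (by simp)
      by_cases habs : x.1 ≤ q.2
      · by_cases hext : q.2 < x.2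
        · -- absorb, extend the last interval's end to x.2
          have hstep : pvMergeStep (front ++ [q]) x = front ++ [(q.1, x.2)] := by
            simp only [pvMergeStep, hqlast]
            rw [if_pos ⟨by simp, habs⟩, if_pos hext, List.dropLast_concat]
          rw [List.foldl_cons, hstep]
          have hp' : (front ++ [(q.1, x.2)]).Pairwise (fun p q => p.1 ≤ q.1) := by
            rw [List.pairwise_append] at hp ⊢
            refine ⟨hp.1, List.pairwise_singleton _ _, ?_⟩
            intro a ha b hb
            simp only [List.mem_singleton] at hb; subst hb
            exact hp.2.2 a ha q (by simp)
          have hc' : (front ++ [(q.1, x.2)]).IsChain (fun p q => p.2 < q.1) := by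
            rw [List.isChain_append] at hc ⊢
            refine ⟨hc.1, .singleton _, ?_⟩
            intro a ha b hb
            simp only [List.head?_cons, Option.mem_def, Option.some.injEq] at hb
            subst hb
            simpa using hc.2.2 a ha q (by simp)
          have hle' : ∀ p ∈ rest, ∀ r ∈ front ++ [(q.1, x.2)], r.1 ≤ p.1 := by
            intro p hpr r hr
            rcases List.mem_append.1 hr with h | h
            · exact hle p (List.mem_cons_of_mem _ hpr) r (List.mem_append_left _ h)
            · simp only [List.mem_singleton] at h; subst h
              exact hql p (List.mem_cons_of_mem _ hpr)
          obtain ⟨hgood, hcov⟩ := ih (front ++ [(q.1, x.2)]) hlrest hp' hc' hle'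
          refine ⟨hgood, fun v => ?_⟩
          rw [hcov v]
          have hq1x : q.1 ≤ x.1 := hql x (List.mem_cons_self ..)
          rw [pvCov_append, pvCov_append, pvCov_singleton, pvCov_singleton, pvCov_cons]
          constructor
          · rintro ((h | h) | h)
            · exact Or.inl (Or.inl h)
            · by_cases hvq : v ≤ q.2
              · exact Or.inl (Or.inr ⟨h.1, hvq⟩)
              · exact Or.inr (Or.inl ⟨by omega, h.2⟩)
            · exact Or.inr (Or.inr h)
          · rintro ((h | h) | h | h)
            · exact Or.inl (Or.inl h)
            · exact Or.inl (Or.inr ⟨h.1, by omega⟩)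
            · exact Or.inl (Or.inr ⟨by omega, h.2⟩)
            · exact Or.inr h
        · -- absorb, x contained in the last interval
          push Not at hext
          have hstep : pvMergeStep (front ++ [q]) x = front ++ [q] := by
            simp only [pvMergeStep, hqlast]
            rw [if_pos ⟨by simp, habs⟩, if_neg (by omega)]
          rw [List.foldl_cons, hstep]
          have hle' : ∀ p ∈ rest, ∀ r ∈ front ++ [q], r.1 ≤ p.1 :=
            fun p hpr r hr => hle p (List.mem_cons_of_mem _ hpr) r hr
          obtain ⟨hgood, hcov⟩ := ih (front ++ [q]) hlrest hp hc hle'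
          refine ⟨hgood, fun v => ?_⟩
          rw [hcov v]
          have hq1x : q.1 ≤ x.1 := hql x (List.mem_cons_self ..)
          rw [pvCov_cons]
          constructor
          · rintro (h | h)
            · exact Or.inl h
            · exact Or.inr (Or.inr h)
          · rintro (h | h | h)
            · exact Or.inl h
            · refine Or.inl ?_
              rw [pvCov_append, pvCov_singleton]
              exact Or.inr ⟨by omega, by omega⟩
            · exact Or.inr h
      · -- append x as a new interval
        push Not at habs
        have hstep : pvMergeStep (front ++ [q]) x = (front ++ [q]) ++ [x] := by
          simp only [pvMergeStep, hqlast]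
          rw [if_neg (by push Not; intro _; omega)]
        rw [List.foldl_cons, hstep]
        have hfqx : ∀ a ∈ front ++ [q], a.1 ≤ x.1 := by
          intro a ha
          have hq1x : q.1 ≤ x.1 := hql x (List.mem_cons_self ..)
          rcases List.mem_append.1 ha with h | h
          · exact le_trans (hfq a h) hq1x
          · simp only [List.mem_singleton] at h; subst h; exact hq1x
        have hp' : ((front ++ [q]) ++ [x]).Pairwise (fun p r => p.1 ≤ r.1) := by
          rw [List.pairwise_append]
          refine ⟨hp, List.pairwise_singleton _ _, ?_⟩
          intro a ha b hb
          simp only [List.mem_singleton] at hb; subst hb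
          exact hfqx a ha
        have hc' : ((front ++ [q]) ++ [x]).IsChain (fun p r => p.2 < r.1) := by
          rw [List.isChain_append]
          refine ⟨hc, .singleton _, ?_⟩
          intro a ha b hb
          simp only [List.head?_cons, Option.mem_def, Option.some.injEq] at hb
          subst hb
          rw [List.getLast?_concat] at ha
          cases ha
          exact habs
        have hle' : ∀ p ∈ rest, ∀ r ∈ (front ++ [q]) ++ [x], r.1 ≤ p.1 := by
          intro p hpr r hr
          rcases List.mem_append.1 hr with h | h
          · exact hle p (List.mem_cons_of_mem _ hpr) r h
          · simp only [List.mem_singleton] at h; subst h; exact hxrest p hpr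
        obtain ⟨hgood, hcov⟩ := ih ((front ++ [q]) ++ [x]) hlrest hp' hc' hle'
        refine ⟨hgood, fun v => ?_⟩
        rw [hcov v]
        rw [pvCov_append, pvCov_singleton, pvCov_cons]
        tauto

theorem pvUpper_spec (merged : List (Int × Int)) (v : Int)
    (hmono : ∀ i j, i ≤ j → j < merged.length → (merged.getD i (0,0)).1 ≤ (merged.getD j (0,0)).1) :
    ∀ n lo hi, hi - lo = n → lo ≤ hi → hi ≤ merged.length →
    (∀ j, j < lo → (merged.getD j (0,0)).1 ≤ v) →
    (∀ j, hi ≤ j → j < merged.length → v < (merged.getD j (0,0)).1) →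
    pvUpper merged v lo hi ≤ merged.length ∧
    (∀ j, j < pvUpper merged v lo hi → (merged.getD j (0,0)).1 ≤ v) ∧
    (∀ j, pvUpper merged v lo hi ≤ j → j < merged.length → v < (merged.getD j (0,0)).1) := by
  intro n
  induction n using Nat.strong_induction_on with
  | _ n ih =>
    intro lo hi hn hlh hhl H1 H2
    rw [pvUpper]
    by_cases hge : lo ≥ hi
    · rw [dif_pos hge]
      exact ⟨by omega, H1, fun j hj hjl => H2 j (by omega) hjl⟩
    · rw [dif_neg hge]
      have h1 : lo ≤ (lo + hi) / 2 := Nat.le_div_iff_mul_le (by norm_num) |>.2 (by omega)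
      have h2 : (lo + hi) / 2 < hi := Nat.div_lt_iff_lt_mul (by norm_num) |>.2 (by omega)
      set mid := (lo + hi) / 2 with hmid
      by_cases hcmp : (merged.getD mid (0,0)).1 ≤ v
      · rw [if_pos hcmp]
        exact ih (hi - (mid + 1)) (by omega) (mid + 1) hi (by omega) (by omega) hhl
          (fun j hj => le_trans (hmono j mid (by omega) (by omega)) hcmp) H2
      · rw [if_neg hcmp]
        exact ih (mid - lo) (by omega) lo mid (by omega) (by omega) (by omega) H1
          (fun j hj hjl => lt_of_lt_of_le (by omega) (hmono mid j hj hjl))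


theorem pvDecide (merged : List (Int × Int)) (v : Int)
    (hp : merged.Pairwise (fun p q => p.1 ≤ q.1))
    (hc : merged.IsChain (fun p q => p.2 < q.1)) :
    (pvUpper merged v 0 merged.length = 0 ∨
      (merged.getD (pvUpper merged v 0 merged.length - 1) (0,0)).2 < v) ↔
    ¬ pvCov merged v := by
  have hmono : ∀ i j, i ≤ j → j < merged.length →
      (merged.getD i (0,0)).1 ≤ (merged.getD j (0,0)).1 := by
    intro i j hij hjl
    rcases Nat.eq_or_lt_of_le hij with h | h
    · subst h; exact le_refl _
    · rw [List.getD_eq_getElem _ _ (by omega), List.getD_eq_getElem _ _ hjl]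
      exact List.pairwise_iff_getElem.1 hp i j (by omega) hjl h
  obtain ⟨hle, Hlt, Hgt⟩ := pvUpper_spec merged v hmono (merged.length - 0) 0 merged.length
    rfl (by omega) (le_refl _) (by omega) (by omega)
  set r := pvUpper merged v 0 merged.length with hr
  have hgap : ∀ i j, i < j → j < merged.length → (merged.getD i (0,0)).2 < (merged.getD j (0,0)).1 := by
    intro i j hij hjl
    have h1 : (merged.getD i (0,0)).2 < (merged.getD (i+1) (0,0)).1 := by
      rw [List.getD_eq_getElem _ _ (by omega), List.getD_eq_getElem _ _ (by omega)]
      exact List.isChain_iff_getElem.1 hc i (by omega)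
    exact lt_of_lt_of_le h1 (hmono (i+1) j (by omega) hjl)
  constructor
  · rintro h ⟨p, hm, hpc⟩
    obtain ⟨j, hjl, hj⟩ := List.mem_iff_getElem.1 hm
    have hpj : merged.getD j (0,0) = p := by rw [List.getD_eq_getElem _ _ hjl, hj]
    by_cases hjr : j < r
    · rcases h with h0 | hend
      · omega
      · -- j < r, end of r-1 < v; if j = r-1 contradiction with v ≤ p.2; if j < r-1, gap
        by_cases hje : j = r - 1
        · subst hje; rw [hpj] at hend; omega
        · have := hgap j (r-1) (by omega) (by omega)
          have hsv : (merged.getD (r-1) (0,0)).1 ≤ v := Hlt (r-1) (by omega)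
          rw [hpj] at this
          omega
    · have := Hgt j (by omega) hjl
      rw [hpj] at this
      omega
  · intro hnc
    by_contra h
    push Not at h
    obtain ⟨h0, hend⟩ := h
    have hrl : r - 1 < merged.length := by omega
    refine hnc ⟨merged.getD (r-1) (0,0), ?_, Hlt (r-1) (by omega), by omega⟩
    rw [List.getD_eq_getElem _ _ hrl]
    exact List.getElem_mem _

-- per-value condition equivalence, A side: the rule-scan flag is "no collected pair covers v"
theorem pvFlag_iff (vals : List (List (List Int))) (v : Int)
    (hPre : ∀ ivls ∈ vals, ivls.length = 2) :
    (vals.foldl (fun b ivls => if value_matches_rule ivls v then false else b) true = true)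
    ↔ ¬ pvCov (vals.flatMap (fun ivls =>
        ivls.map (fun iv => (PySem.List.pyGetD iv 0 0, PySem.List.pyGetD iv 1 0)))) v := by
  rw [PySem.List.foldl_if_false_eq]
  simp only [Bool.true_and, Bool.not_eq_eq_eq_not, Bool.not_true, List.any_eq_false]
  constructor
  · rintro h ⟨p, hm, hpc⟩
    obtain ⟨ivls, hivls, hpm⟩ := List.mem_flatMap.1 hm
    have hlen := hPre ivls hivls
    match ivls, hlen with
    | [i1, i2], _ =>
      have := h [i1, i2] hivls
      simp only [value_matches_rule, PySem.List.pyGetD_zero_cons] at this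
      have h1 : PySem.List.pyGetD [i1, i2] 1 ([] : List Int) = i2 := by
        simp [PySem.List.pyGetD]
      rw [h1] at this
      split_ifs at this with hcond
      · exact absurd rfl this
      · rcases List.mem_cons.1 hpm with hp1 | hp2
        · subst hp1; exact hcond (Or.inl ⟨hpc.1, hpc.2⟩)
        · rcases List.mem_cons.1 hp2 with hp2 | hf
          · subst hp2; exact hcond (Or.inr ⟨hpc.1, hpc.2⟩)
          · simp at hf
  · intro h ivls hivls
    have hlen := hPre ivls hivls
    match ivls, hlen with
    | [i1, i2], _ =>
      simp only [value_matches_rule, PySem.List.pyGetD_zero_cons]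
      have h1 : PySem.List.pyGetD [i1, i2] 1 ([] : List Int) = i2 := by
        simp [PySem.List.pyGetD]
      rw [h1]
      split_ifs with hcond
      · exfalso
        refine h ?_
        rcases hcond with hc | hc
        · exact ⟨(PySem.List.pyGetD i1 0 0, PySem.List.pyGetD i1 1 0),
            List.mem_flatMap.2 ⟨[i1, i2], hivls, by simp⟩, hc⟩
        · exact ⟨(PySem.List.pyGetD i2 0 0, PySem.List.pyGetD i2 1 0),
            List.mem_flatMap.2 ⟨[i1, i2], hivls, by simp⟩, hc⟩
      · simp

-- pvCov only depends on membership, so sorting does not change it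
theorem pvCov_sorted (l : List (Int × Int)) (v : Int) :
    pvCov (PySem.List.sorted l (fun t => t.1) false) v ↔ pvCov l v := by
  constructor
  · rintro ⟨p, hm, hpc⟩; exact ⟨p, (PySem.List.mem_sorted _ _ _ _).1 hm, hpc⟩
  · rintro ⟨p, hm, hpc⟩; exact ⟨p, (PySem.List.mem_sorted _ _ _ _).2 hm, hpc⟩

-- ===== VERDICT (by name: the statement is the Claim_ definition above) =====
theorem get_invalid_ticket_values_spec : Claim_equal_get_invalid_ticket_values := by
  intro ticket_rules nearby_ticket _ hPre
  show get_invalid_ticket_values ticket_rules nearby_ticket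
      = get_invalid_ticket_values_alt ticket_rules nearby_ticket
  rcases hPre.2 with hnil | hlen
  · subst hnil; rfl
  unfold get_invalid_ticket_values get_invalid_ticket_values_alt
  simp only []
  set vals := (PySem.Dict.ofList ticket_rules).values with hvals
  have hinner : (vals.foldl (fun acc intervalls =>
      intervalls.foldl (fun acc iv => acc ++ [(PySem.List.pyGetD iv 0 0, PySem.List.pyGetD iv 1 0)]) acc) [])
      = vals.flatMap (fun ivls => ivls.map (fun iv => (PySem.List.pyGetD iv 0 0, PySem.List.pyGetD iv 1 0))) := by
    simp only [PySem.List.foldl_append_singleton_eq_map]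
    rw [PySem.List.foldl_append_eq_flatMap]
    simp
  rw [hinner]
  set pairs := vals.flatMap (fun ivls => ivls.map (fun iv => (PySem.List.pyGetD iv 0 0, PySem.List.pyGetD iv 1 0))) with hpairs
  set sortedp := PySem.List.sorted pairs (fun t => t.1) false with hsort
  have hsl : sortedp.Pairwise (fun p q => p.1 ≤ q.1) := PySem.List.sorted_pairwise pairs (fun t => t.1)
  obtain ⟨⟨hmp, hmc⟩, hmcov⟩ :=
    pvMerge_spec sortedp [] hsl (List.Pairwise.nil) (List.IsChain.nil) (by intro p _ q hq; simp at hq)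
  set merged := sortedp.foldl pvMergeStep [] with hmerged
  apply PySem.List.foldl_congr_mem
  intro acc value _
  have hA : ((vals.foldl (fun b intervalls => if value_matches_rule intervalls value then false else b) true) = true)
      ↔ (pvUpper merged value 0 merged.length = 0 ∨
          (merged.getD (pvUpper merged value 0 merged.length - 1) (0, 0)).2 < value) := by
    rw [pvFlag_iff vals value hlen, pvDecide merged value hmp hmc]
    rw [hmcov value, pvCov_nil, hsort, pvCov_sorted]
    tauto
  by_cases hb : (vals.foldl (fun b intervalls => if value_matches_rule intervalls value then false else b) true) = true
  · rw [if_pos hb, if_pos (hA.1 hb)]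
  · rw [if_neg hb, if_neg (fun hc => hb (hA.2 hc))]
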